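-- pv_equiv track=rewrite | github.com/clarali65/Python-practice | data structure and algorithm_exercise/ex5/ex5_3.py | check
-- ===== SOURCE A (Python) =====
-- def check(lst1, lst2):
--     flag = 0
--     for i in range(len(lst2) - 1):
--         if lst2[i] > lst2[i+1]:
--             flag = i+1
--             break
--     if lst1[flag:] == lst2[flag:]:#插入排序
--         result = sorted(lst1[:flag+1])+lst2[flag+1:]#再迭代一轮的结果
--         return True, result
--     else: #归并排序
--         cnt = 2 #归并的数量
--         result = lst2
--         while result == lst2: #不断归并排序直到顺序发生变化
--             sub_lst = [sorted(lst2[i:i+cnt]) for i in range(0, len(lst2), cnt)]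
--             result = [num for sub in sub_lst for num in sub]
--             cnt = cnt * 2
--         return False, result
-- ===== SOURCE B (Python) =====
-- def _first_descent(lst):
--     i = 1
--     rest = lst
--     while len(rest) >= 2:
--         if rest[0] > rest[1]:
--             return i
--         rest = rest[1:]
--         i += 1
--     return 0
--
--
-- def _blocks_sorted(lst, c):
--     # True iff every chunk of size c of lst is already nondecreasing
--     while lst:
--         head, lst = lst[:c], lst[c:]
--         if any(a > b for a, b in zip(head, head[1:])):
--             return False
--     return True
--
--
-- def _blocksort(lst, c):
--     out = []
--     while lst:
--         out += sorted(lst[:c])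
--         lst = lst[c:]
--     return out
--
--
-- def check(lst1, lst2):
--     flag = _first_descent(lst2)
--     if lst1[flag:] == lst2[flag:]:
--         return True, sorted(lst1[:flag + 1]) + lst2[flag + 1:]
--     c = 2
--     while _blocks_sorted(lst2, c):
--         c *= 2
--     return False, _blocksort(lst2, c)
-- ===== Notes on version B (the rewrite author's own statement) =====
-- stated objective: alternative
-- what changed: The merge-sort branch no longer rebuilds a block-sorted copy of lst2 and compares it to lst2 on every pass; B scans chunks of the list structurally (take/drop with a zip-adjacent check) to find the first block size whose blocks are not already nondecreasing, and only then block-sorts once to produce the result; the first-descent search is likewise a structural walk instead of an index loop.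
import Mathlib
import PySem

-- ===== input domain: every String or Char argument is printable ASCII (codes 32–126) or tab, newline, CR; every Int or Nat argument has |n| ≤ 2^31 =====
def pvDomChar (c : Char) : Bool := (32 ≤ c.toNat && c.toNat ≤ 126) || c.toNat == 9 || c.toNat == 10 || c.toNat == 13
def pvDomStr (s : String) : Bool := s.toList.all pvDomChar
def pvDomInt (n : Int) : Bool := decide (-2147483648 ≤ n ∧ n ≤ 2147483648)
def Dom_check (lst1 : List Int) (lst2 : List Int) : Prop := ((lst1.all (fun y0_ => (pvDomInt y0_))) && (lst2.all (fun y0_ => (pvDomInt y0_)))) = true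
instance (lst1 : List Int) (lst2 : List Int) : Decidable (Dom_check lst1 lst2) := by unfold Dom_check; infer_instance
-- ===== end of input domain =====

-- B replaces A's merge branch (repeatedly build a block-sorted copy and compare it with lst2)
-- by a structural scan: find the first block size whose blocks are not already nondecreasing,
-- then block-sort once; objective: alternative (no measured speed claim).

-- ===== PORT A =====
-- for i in range(len(lst2)-1): if lst2[i] > lst2[i+1]: flag = i+1; break
-- (indices i, i+1 are always in range, so pyGetD's default is never used)
def flagLoopA (l : List Int) : List Int → Int
  | [] => 0
  | i :: rest =>
    if PySem.List.pyGetD l i 0 > PySem.List.pyGetD l (i + 1) 0 then i + 1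
    else flagLoopA l rest

-- sub_lst = [sorted(lst2[i:i+cnt]) for i in range(0, len(lst2), cnt)]
-- result  = [num for sub in sub_lst for num in sub]
def blocksortA (l : List Int) (cnt : Int) : List Int :=
  let sub_lst := (PySem.List.pyRange 0 (l.length : Int) cnt).map
    (fun i => PySem.List.sorted (PySem.List.slice l (some i) (some (i + cnt))) (fun x => x) false)
  sub_lst.flatMap (fun sub => sub)

-- while result == lst2: result = blocksort(lst2, cnt); cnt *= 2
-- fuel cap: on every input admitted by Pre_check the loop provably exits before the fuel runs out
def mergeA (l : List Int) : Nat → List Int → Int → List Int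
  | 0, result, _ => result
  | fuel + 1, result, cnt =>
    if result = l then mergeA l fuel (blocksortA l cnt) (cnt * 2) else result

def check (lst1 : List Int) (lst2 : List Int) : Bool × List Int :=
  let flag := flagLoopA lst2 (PySem.List.pyRange 0 ((lst2.length : Int) - 1) 1)
  if PySem.List.slice lst1 (some flag) none = PySem.List.slice lst2 (some flag) none then
    (true, PySem.List.sorted (PySem.List.slice lst1 none (some (flag + 1))) (fun x => x) false
             ++ PySem.List.slice lst2 (some (flag + 1)) none)
  else
    (false, mergeA lst2 (lst2.length + 2) lst2 2)

-- ===== PORT B =====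
-- _first_descent: walk the list keeping a 1-based position counter
def firstDescentB : List Int → Int → Int
  | a :: b :: rest, i => if a > b then i else firstDescentB (b :: rest) (i + 1)
  | _, _ => 0

-- any(a > b for a, b in zip(head, head[1:]))
def pairsAnyB (head : List Int) : Bool :=
  (head.zip head.tail).any (fun p => decide (p.1 > p.2))

-- _blocks_sorted(lst, c): chop off chunks of size c, each must be nondecreasing
-- (only ever called with c ≥ 2, where 'xs.drop (c-1)' is exactly Python's lst[c:])
def blocksSortedB (c : Nat) : List Int → Bool
  | [] => true
  | x :: xs => if pairsAnyB ((x :: xs).take c) then false else blocksSortedB c (xs.drop (c - 1))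
  termination_by l => l.length
  decreasing_by simp

-- _blocksort(lst, c): sorted chunks of size c, concatenated front to back
def blocksortB (c : Nat) : List Int → List Int
  | [] => []
  | x :: xs => PySem.List.sorted ((x :: xs).take c) (fun y => y) false ++ blocksortB c (xs.drop (c - 1))
  termination_by l => l.length
  decreasing_by simp

-- while _blocks_sorted(lst2, c): c *= 2    (same fuel cap as port A, unreachable under Pre_check)
def mergeLoopB (l : List Int) : Nat → Int → Int
  | 0, c => c
  | fuel + 1, c => if blocksSortedB c.toNat l then mergeLoopB l fuel (c * 2) else c

def check_alt (lst1 : List Int) (lst2 : List Int) : Bool × List Int :=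
  let flag := firstDescentB lst2 1
  if PySem.List.slice lst1 (some flag) none = PySem.List.slice lst2 (some flag) none then
    (true, PySem.List.sorted (PySem.List.slice lst1 none (some (flag + 1))) (fun x => x) false
             ++ PySem.List.slice lst2 (some (flag + 1)) none)
  else
    (false, blocksortB (mergeLoopB lst2 (lst2.length + 2) 2).toNat lst2)

-- ===== PRECONDITION & SPEC =====
-- Pre_ excludes exactly the inputs where lst2 is already sorted but lst1 ≠ lst2:
-- there Python A's merge loop never changes lst2 and loops forever (A returns no value).
def Pre_check (lst1 : List Int) (lst2 : List Int) : Prop :=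
  lst2.Pairwise (· ≤ ·) → lst1 = lst2
instance (lst1 : List Int) (lst2 : List Int) : Decidable (Pre_check lst1 lst2) := by
  unfold Pre_check; infer_instance

def pvWitness_check : List Int × List Int := ([1, 3, 2], [1, 3, 2])

def Spec_check (lst1 : List Int) (lst2 : List Int) (out : Bool × List Int) : Prop := out = check_alt lst1 lst2
instance (lst1 : List Int) (lst2 : List Int) (out : Bool × List Int) : Decidable (Spec_check lst1 lst2 out) := by unfold Spec_check; infer_instance

-- ===== CLAIM (what is proved, stated in full; the proofs are below) =====
def Claim_equal_check : Prop := ∀ (lst1 : List Int) (lst2 : List Int), Dom_check lst1 lst2 → Pre_check lst1 lst2 → Spec_check lst1 lst2 (check lst1 lst2)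

-- ===== LEMMAS AND PROOFS =====

theorem pairwise_cons_cons (a b : Int) (t : List Int) :
    (a :: b :: t).Pairwise (· ≤ ·) ↔ a ≤ b ∧ (b :: t).Pairwise (· ≤ ·) := by
  simp only [List.pairwise_cons, List.mem_cons]
  constructor
  · rintro ⟨h1, h2, h3⟩
    exact ⟨h1 b (Or.inl rfl), h2, h3⟩
  · rintro ⟨hab, h2, h3⟩
    refine ⟨?_, h2, h3⟩
    rintro x (rfl | hx)
    · exact hab
    · exact le_trans hab (h2 x hx)

theorem pairsAnyB_false_iff (l : List Int) :
    pairsAnyB l = false ↔ l.Pairwise (· ≤ ·) := by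
  induction l with
  | nil => simp [pairsAnyB]
  | cons a rest ih =>
    cases rest with
    | nil => simp [pairsAnyB]
    | cons b t =>
      rw [pairwise_cons_cons, ← ih]
      simp only [pairsAnyB, List.tail_cons, List.zip_cons_cons, List.any_cons]
      constructor
      · intro h
        simp only [Bool.or_eq_false_iff, decide_eq_false_iff_not, not_lt] at h ⊢
        omega
      · intro ⟨h1, h2⟩
        simp only [Bool.or_eq_false_iff, decide_eq_false_iff_not]
        exact ⟨by omega, h2⟩

theorem firstDescentB_short (l : List Int) (i : Int) (h : l.length ≤ 1) :
    firstDescentB l i = 0 := by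
  match l with
  | [] => rfl
  | [a] => rfl
  | a :: b :: t => simp at h

theorem flag_eq_aux (l : List Int) :
    ∀ fuel k : Nat, l.length - k ≤ fuel →
      flagLoopA l (PySem.List.pyRange (k : Int) ((l.length : Int) - 1) 1)
        = firstDescentB (l.drop k) ((k : Int) + 1) := by
  intro fuel
  induction fuel with
  | zero =>
    intro k hk
    rw [PySem.List.pyRange_one_eq_nil (by omega)]
    rw [List.drop_eq_nil_of_le (by omega)]
    rfl
  | succ fuel ih =>
    intro k hk
    by_cases hlt : k + 1 < l.length
    · have hk1 : k < l.length := by omega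
      have hk2 : k + 1 < l.length := hlt
      rw [PySem.List.pyRange_one_cons (by push_cast; omega)]
      rw [List.drop_eq_getElem_cons hk1, List.drop_eq_getElem_cons hk2]
      show (if PySem.List.pyGetD l (k : Int) 0 > PySem.List.pyGetD l ((k : Int) + 1) 0
              then (k : Int) + 1
              else flagLoopA l (PySem.List.pyRange ((k : Int) + 1) ((l.length : Int) - 1) 1))
           = _
      have e1 : PySem.List.pyGetD l (k : Int) 0 = l[k] := by
        rw [PySem.List.pyGetD_eq_getElem l 0 (by omega) (by push_cast; omega)]
        simp
      have e2 : PySem.List.pyGetD l ((k : Int) + 1) 0 = l[k + 1] := by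
        have : ((k : Int) + 1) = ((k + 1 : Nat) : Int) := by push_cast; ring
        rw [this, PySem.List.pyGetD_eq_getElem l 0 (by omega) (by push_cast; omega)]
        simp
      have e3 : ((k : Int) + 1) = ((k + 1 : Nat) : Int) := by push_cast; ring
      rw [e1, e2, firstDescentB]
      by_cases hc : l[k] > l[k + 1]
      · rw [if_pos hc, if_pos hc]
      · rw [if_neg hc, if_neg hc]
        have h4 := ih (k + 1) (by omega)
        rw [List.drop_eq_getElem_cons hk2] at h4
        rw [e3]
        exact h4
    · rw [PySem.List.pyRange_one_eq_nil (by push_cast; omega)]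
      rw [firstDescentB_short _ _ (by simp; omega)]
      rfl

theorem flag_eq (l : List Int) :
    flagLoopA l (PySem.List.pyRange 0 ((l.length : Int) - 1) 1) = firstDescentB l 1 := by
  have := flag_eq_aux l l.length 0 (by omega)
  simpa using this

theorem pyRange_nonpos (b c : Int) (hc : 0 < c) (hb : b ≤ 0) :
    PySem.List.pyRange 0 b c = [] := by
  rw [PySem.List.pyRange_of_pos _ _ hc]
  rw [if_neg (by omega)]
  rfl

theorem pyRange_pos_cons (a b c : Int) (hc : 0 < c) (h : a < b) :
    PySem.List.pyRange a b c = a :: PySem.List.pyRange (a + c) b c := by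
  rw [PySem.List.pyRange_of_pos _ _ hc, PySem.List.pyRange_of_pos _ _ hc]
  rw [if_pos h]
  by_cases h2 : a + c < b
  · rw [if_pos h2]
    have key : ((b - a + c - 1) / c).toNat = ((b - (a + c) + c - 1) / c).toNat + 1 := by
      have e : b - a + c - 1 = (b - (a + c) + c - 1) + 1 * c := by ring
      rw [e, Int.add_mul_ediv_right _ _ (by omega : c ≠ 0)]
      have hnn : 0 ≤ (b - (a + c) + c - 1) / c := by
        apply Int.ediv_nonneg <;> omega
      omega
    rw [key, List.range_succ_eq_map]
    simp only [List.map_cons, List.map_map]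
    congr 1
    · simp
    · apply List.map_congr_left
      intro k _
      simp [Function.comp, Nat.succ_eq_add_one]
      push_cast
      ring
  · rw [if_neg h2]
    have key : ((b - a + c - 1) / c).toNat = 1 := by
      have h1 : 1 ≤ (b - a + c - 1) / c := by
        rw [Int.le_ediv_iff_mul_le hc]; omega
      have h2' : (b - a + c - 1) / c < 2 := by
        rw [Int.ediv_lt_iff_lt_mul hc]; omega
      omega
    rw [key]
    simp

theorem pyRange_shift (b c : Int) (hc : 0 < c) :
    PySem.List.pyRange c b c = (PySem.List.pyRange 0 (b - c) c).map (· + c) := by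
  rw [PySem.List.pyRange_of_pos _ _ hc, PySem.List.pyRange_of_pos _ _ hc]
  by_cases h : c < b
  · rw [if_pos h, if_pos (by omega : (0:Int) < b - c)]
    rw [List.map_map]
    have he : b - c - 0 + c - 1 = b - c + c - 1 := by ring
    rw [he]
    apply List.map_congr_left
    intro k _
    simp [Function.comp]
    ring
  · rw [if_neg h, if_neg (by omega : ¬ (0:Int) < b - c)]
    simp

theorem slice_drop (l : List Int) (i c : Int) (hi : 0 ≤ i) (hc : 0 ≤ c) :
    PySem.List.slice l (some (i + c)) (some (i + c + c))
      = PySem.List.slice (l.drop c.toNat) (some i) (some (i + c)) := by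
  obtain ⟨a, rfl⟩ : ∃ a : Nat, i = (a : Int) := ⟨i.toNat, (Int.toNat_of_nonneg hi).symm⟩
  obtain ⟨m, rfl⟩ : ∃ m : Nat, c = (m : Int) := ⟨c.toNat, (Int.toNat_of_nonneg hc).symm⟩
  have L : PySem.List.slice l (some ((a : Int) + m)) (some ((a : Int) + m + m))
      = List.take m (List.drop (a + m) l) := by
    have e1 : (a : Int) + m = ((a + m : Nat) : Int) := by push_cast; ring
    have e2 : (a : Int) + m + m = ((a + m : Nat) : Int) + ((m : Nat) : Int) := by push_cast; ring
    rw [e2, e1]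
    exact PySem.List.slice_natCast_add l (a + m) m
  have R : PySem.List.slice (l.drop ((m : Int)).toNat) (some (a : Int)) (some ((a : Int) + m))
      = List.take m (List.drop a (l.drop ((m : Int)).toNat)) :=
    PySem.List.slice_natCast_add _ a m
  rw [L, R, Int.toNat_natCast, List.drop_drop]
  congr 2
  omega

theorem blocksortA_eq (c : Int) (hc : 1 ≤ c) (l : List Int) :
    blocksortA l c = blocksortB c.toNat l := by
  induction l using blocksortB.induct c.toNat with
  | case1 =>
    simp [blocksortA, blocksortB, pyRange_nonpos 0 c (by omega) (by simp)]
  | case2 x xs ih =>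
    have hlen : (0 : Int) < ((x :: xs).length : Int) := by simp
    have hdrop : xs.drop (c.toNat - 1) = (x :: xs).drop c.toNat := by
      obtain ⟨m, hm⟩ : ∃ m, c.toNat = m + 1 := ⟨c.toNat - 1, by omega⟩
      rw [hm, List.drop_succ_cons]
      simp
    rw [blocksortB, ← ih, hdrop]
    unfold blocksortA
    rw [pyRange_pos_cons 0 _ c (by omega) hlen]
    simp only [List.map_cons, List.flatMap_cons, zero_add]
    congr 1
    · congr 1
      rw [PySem.List.slice_zero_start, PySem.List.slice_to _ (by omega)]
    · rw [pyRange_shift _ c (by omega), List.map_map]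
      have hmap : ∀ i ∈ PySem.List.pyRange 0 (((x :: xs).length : Int) - c) c,
          PySem.List.sorted (PySem.List.slice (x :: xs) (some (i + c)) (some (i + c + c))) (fun y => y) false
            = PySem.List.sorted (PySem.List.slice ((x :: xs).drop c.toNat) (some i) (some (i + c))) (fun y => y) false := by
        intro i hi
        have h0 : 0 ≤ i := by
          rcases (PySem.List.mem_pyRange_iff_of_pos (by omega : (0:Int) < c) i).mp hi with ⟨h1, _, _⟩
          omega
        rw [slice_drop _ i c h0 (by omega)]
      have hrange : PySem.List.pyRange 0 (((x :: xs).length : Int) - c) c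
          = PySem.List.pyRange 0 ((((x :: xs).drop c.toNat).length : Int)) c := by
        by_cases hcn : c ≤ ((x :: xs).length : Int)
        · congr 1
          simp only [List.length_drop]
          push_cast
          omega
        · rw [pyRange_nonpos _ _ (by omega) (by omega), pyRange_nonpos _ _ (by omega) ?_]
          simp only [List.length_drop]
          push_cast
          omega
      calc ((PySem.List.pyRange 0 (((x :: xs).length : Int) - c) c).map
              (fun i => PySem.List.sorted (PySem.List.slice (x :: xs) (some (i + c)) (some (i + c + c))) (fun y => y) false)).flatMap (fun sub => sub)
          = ((PySem.List.pyRange 0 (((x :: xs).length : Int) - c) c).map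
              (fun i => PySem.List.sorted (PySem.List.slice ((x :: xs).drop c.toNat) (some i) (some (i + c))) (fun y => y) false)).flatMap (fun sub => sub) := by
            rw [List.map_congr_left hmap]
        _ = _ := by rw [hrange]

theorem blocksortB_eq_self_iff (c : Nat) (hc : 1 ≤ c) (l : List Int) :
    blocksortB c l = l ↔ blocksSortedB c l = true := by
  induction l using blocksortB.induct c with
  | case1 => simp [blocksortB, blocksSortedB]
  | case2 x xs ih =>
    have hdrop : xs.drop (c - 1) = (x :: xs).drop c := by
      obtain ⟨m, hm⟩ : ∃ m, c = m + 1 := ⟨c - 1, by omega⟩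
      rw [hm, List.drop_succ_cons]
      simp
    have hsplit : (x :: xs).take c ++ xs.drop (c - 1) = x :: xs := by
      rw [hdrop, List.take_append_drop]
    rw [blocksortB, blocksSortedB]
    constructor
    · intro h
      replace h := h.trans hsplit.symm
      have hlen : (PySem.List.sorted ((x :: xs).take c) (fun y => y) false).length
          = ((x :: xs).take c).length := PySem.List.length_sorted _ _ _
      obtain ⟨h1, h2⟩ := List.append_inj h hlen
      have hpw : ((x :: xs).take c).Pairwise (· ≤ ·) := by
        have := PySem.List.sorted_pairwise ((x :: xs).take c) (fun y => y)
        rw [h1] at this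
        exact this
      rw [if_neg (by rw [(pairsAnyB_false_iff _).mpr hpw]; simp)]
      exact ih.mp h2
    · intro h
      by_cases hp : pairsAnyB ((x :: xs).take c) = true
      · rw [if_pos hp] at h; exact absurd h (by simp)
      · rw [if_neg hp] at h
        have hpw := (pairsAnyB_false_iff _).mp (by simpa using hp)
        rw [PySem.List.sorted_eq_self_of_pairwise _ _ (by simpa using hpw)]
        rw [ih.mpr h]
        exact hsplit

theorem blocksSortedB_false_of_le (c : Nat) (l : List Int)
    (hns : ¬ l.Pairwise (· ≤ ·)) (hlen : l.length ≤ c) :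
    blocksSortedB c l = false := by
  match l with
  | [] => exact absurd List.Pairwise.nil hns
  | x :: xs =>
    rw [blocksSortedB]
    rw [List.take_of_length_le hlen]
    rw [if_pos ?_]
    cases hp : pairsAnyB (x :: xs)
    · exact absurd ((pairsAnyB_false_iff _).mp hp) hns
    · rfl

theorem mergeA_ne (l r : List Int) (fuel : Nat) (cnt : Int) (h : r ≠ l) :
    mergeA l fuel r cnt = r := by
  cases fuel with
  | zero => rfl
  | succ fuel => rw [mergeA, if_neg h]

theorem loops_eq (l : List Int) (hd : ¬ l.Pairwise (· ≤ ·)) :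
    ∀ (fuel : Nat) (c : Int), 1 ≤ c → (l.length : Int) ≤ 2 ^ fuel * c →
      mergeA l (fuel + 1) l c = blocksortB (mergeLoopB l (fuel + 1) c).toNat l := by
  intro fuel
  induction fuel with
  | zero =>
    intro c hc hb
    have hfalse : blocksSortedB c.toNat l = false := by
      apply blocksSortedB_false_of_le _ _ hd
      omega
    rw [mergeA, if_pos rfl]
    show blocksortA l c = _
    rw [mergeLoopB, hfalse]
    simp only [Bool.false_eq_true, if_false]
    exact blocksortA_eq c hc l
  | succ fuel ih =>
    intro c hc hb
    rw [mergeA, if_pos rfl, mergeLoopB]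
    by_cases hbs : blocksSortedB c.toNat l = true
    · have heq : blocksortA l c = l := by
        rw [blocksortA_eq c hc l]
        exact (blocksortB_eq_self_iff c.toNat (by omega) l).mpr hbs
      rw [heq, hbs, if_pos rfl]
      apply ih (c * 2) (by omega)
      calc (l.length : Int) ≤ 2 ^ (fuel + 1) * c := hb
        _ = 2 ^ fuel * (c * 2) := by ring
    · have hne : blocksortA l c ≠ l := by
        intro h
        exact hbs ((blocksortB_eq_self_iff c.toNat (by omega) l).mp (by rw [← blocksortA_eq c hc l]; exact h))
      rw [mergeA_ne l _ (fuel + 1) (c * 2) hne, if_neg hbs]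
      exact blocksortA_eq c hc l

theorem len_le_pow (n : Nat) : (n : Int) ≤ 2 ^ (n + 1) * 2 := by
  have h1 : n < 2 ^ n := Nat.lt_two_pow_self
  have h2 : 2 ^ n ≤ 2 ^ (n + 1) * 2 := by
    calc 2 ^ n ≤ 2 ^ (n + 1) := Nat.pow_le_pow_right (by omega) (by omega)
      _ ≤ 2 ^ (n + 1) * 2 := by omega
  exact_mod_cast le_of_lt (lt_of_lt_of_le h1 h2)

-- ===== VERDICT (by name: the statement is the Claim_ definition above) =====
theorem check_spec : Claim_equal_check := by
  intro lst1 lst2 _ hpre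
  show check lst1 lst2 = check_alt lst1 lst2
  unfold check check_alt
  rw [flag_eq lst2]
  by_cases hcond : PySem.List.slice lst1 (some (firstDescentB lst2 1)) none
      = PySem.List.slice lst2 (some (firstDescentB lst2 1)) none
  · rw [if_pos hcond, if_pos hcond]
  · rw [if_neg hcond, if_neg hcond]
    have hd : ¬ lst2.Pairwise (· ≤ ·) := by
      intro hpw
      exact hcond (by rw [hpre hpw])
    have := loops_eq lst2 hd (lst2.length + 1) 2 (by omega) (len_le_pow lst2.length)
    exact congrArg _ this
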